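-- pv_equiv track=rewrite | github.com/Konabur/todohelpbot | my_functions.py | task_list_to_str
-- ===== SOURCE A (Python) =====
-- def task_list_to_str(tasks: list) -> str:
--     '''Возвращает строку, в которой каждая задача пронумерована и выполненные задачи вынесены отдельно'''
--     task_list = done_list = '\n'
--     i = 0
--     for task in tasks:
--         if task[1]:
--             # зачёркиваем каждую выполненную задачу с п-ю <s>...</s>
--             done_list += str(i) + ')✅ <s>' + task[0] + '</s>' + '\n'
--         else:
--             task_list += str(i) + ') ' + task[0] + '\n'
--         i += 1
--
--     result = 'Сделанные:' + done_list + '\nОставшиеся:' + task_list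
--
--     return result
-- ===== SOURCE B (Python) =====
-- def task_list_to_str(tasks: list) -> str:
--     '''Возвращает строку, в которой каждая задача пронумерована и выполненные задачи вынесены отдельно'''
--     def blocks(i, rest):
--         # recursively build (done_block, remaining_block) back-to-front
--         if not rest:
--             return ('', '')
--         task = rest[0]
--         done, rem = blocks(i + 1, rest[1:])
--         if task[1]:
--             return (str(i) + ')✅ <s>' + task[0] + '</s>\n' + done, rem)
--         else:
--             return (done, str(i) + ') ' + task[0] + '\n' + rem)
--     done, rem = blocks(0, tasks)
--     return 'Сделанные:\n' + done + '\nОставшиеся:\n' + rem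
-- ===== Notes on version B (the rewrite author's own statement) =====
-- stated objective: alternative
-- what changed: Replaces A's single iterative loop mutating two accumulator strings and a manual counter by a structural recursion that returns the (done, remaining) block pair, building both blocks back-to-front by prepending.
import Mathlib
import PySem

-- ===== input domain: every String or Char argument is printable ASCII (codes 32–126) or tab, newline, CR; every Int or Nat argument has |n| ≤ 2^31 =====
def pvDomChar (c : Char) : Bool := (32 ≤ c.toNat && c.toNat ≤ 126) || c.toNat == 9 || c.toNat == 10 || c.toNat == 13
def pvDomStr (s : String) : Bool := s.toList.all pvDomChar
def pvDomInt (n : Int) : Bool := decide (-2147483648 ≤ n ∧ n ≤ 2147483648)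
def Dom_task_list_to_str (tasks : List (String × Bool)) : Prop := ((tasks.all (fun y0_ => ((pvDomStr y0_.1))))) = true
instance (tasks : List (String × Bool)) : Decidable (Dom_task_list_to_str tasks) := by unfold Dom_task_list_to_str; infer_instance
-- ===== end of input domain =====

-- B replaces A's iterative loop over two mutable accumulator strings and a counter
-- by a structural recursion returning the (done, remaining) pair built back-to-front
-- (objective: alternative decomposition).

-- ===== PORT A =====
-- one pass: state = (task_list, done_list, i), exactly A's loop
def task_list_to_str (tasks : List (String × Bool)) : String :=
  let st := tasks.foldl
    (fun (st : String × String × Int) task =>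
      if task.2 then
        (st.1, st.2.1 ++ PySem.Int.toStr st.2.2 ++ ")✅ <s>" ++ task.1 ++ "</s>" ++ "\n", st.2.2 + 1)
      else
        (st.1 ++ PySem.Int.toStr st.2.2 ++ ") " ++ task.1 ++ "\n", st.2.1, st.2.2 + 1))
    ("\n", "\n", (0 : Int))
  "Сделанные:" ++ st.2.1 ++ "\nОставшиеся:" ++ st.1

-- ===== PORT B =====
-- recursion returning the (done, remaining) block pair, built back-to-front
def pvBlocks (i : Int) : List (String × Bool) → String × String
  | [] => ("", "")
  | task :: rest =>
    let p := pvBlocks (i + 1) rest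
    if task.2 then
      (PySem.Int.toStr i ++ ")✅ <s>" ++ task.1 ++ "</s>\n" ++ p.1, p.2)
    else
      (p.1, PySem.Int.toStr i ++ ") " ++ task.1 ++ "\n" ++ p.2)

def task_list_to_str_alt (tasks : List (String × Bool)) : String :=
  let p := pvBlocks 0 tasks
  "Сделанные:\n" ++ p.1 ++ "\nОставшиеся:\n" ++ p.2

-- ===== PRECONDITION & SPEC =====
def Spec_task_list_to_str (tasks : List (String × Bool)) (out : String) : Prop := out = task_list_to_str_alt tasks
instance (tasks : List (String × Bool)) (out : String) : Decidable (Spec_task_list_to_str tasks out) := by unfold Spec_task_list_to_str; infer_instance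

-- ===== CLAIM (what is proved, stated in full; the proofs are below) =====
def Claim_equal_task_list_to_str : Prop := ∀ (tasks : List (String × Bool)), Dom_task_list_to_str tasks → Spec_task_list_to_str tasks (task_list_to_str tasks)

-- ===== LEMMAS AND PROOFS =====

theorem pv_sassoc (a b c : String) : a ++ b ++ c = a ++ (b ++ c) := String.append_assoc

theorem pv_foldl_inv (tasks : List (String × Bool)) :
    ∀ (t d : String) (s : Int),
    tasks.foldl
      (fun (st : String × String × Int) task =>
        if task.2 then
          (st.1, st.2.1 ++ PySem.Int.toStr st.2.2 ++ ")✅ <s>" ++ task.1 ++ "</s>" ++ "\n", st.2.2 + 1)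
        else
          (st.1 ++ PySem.Int.toStr st.2.2 ++ ") " ++ task.1 ++ "\n", st.2.1, st.2.2 + 1))
      (t, d, s)
    = (t ++ (pvBlocks s tasks).2, d ++ (pvBlocks s tasks).1, s + tasks.length) := by
  induction tasks with
  | nil => intro t d s; simp [pvBlocks]
  | cons a xs ih =>
    intro t d s
    simp only [List.foldl_cons]
    by_cases h : a.2
    · simp only [h, if_true]
      rw [ih]
      simp only [pvBlocks, h, if_true, List.length_cons, Prod.mk.injEq, String.append_assoc]
      refine ⟨?_, ?_, ?_⟩ <;> first | trivial | (push_cast; ring)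
    · simp only [h, Bool.false_eq_true, if_false]
      rw [ih]
      simp only [pvBlocks, h, Bool.false_eq_true, if_false, List.length_cons, Prod.mk.injEq,
        String.append_assoc]
      refine ⟨?_, ?_, ?_⟩ <;> first | trivial | (push_cast; ring)

-- ===== VERDICT (by name: the statement is the Claim_ definition above) =====
theorem task_list_to_str_spec : Claim_equal_task_list_to_str := by
  intro tasks _
  unfold Spec_task_list_to_str task_list_to_str task_list_to_str_alt
  simp only [pv_foldl_inv]
  show "Сделанные:" ++ ("\n" ++ (pvBlocks 0 tasks).1) ++ "\nОставшиеся:" ++ ("\n" ++ (pvBlocks 0 tasks).2)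
      = "Сделанные:\n" ++ (pvBlocks 0 tasks).1 ++ "\nОставшиеся:\n" ++ (pvBlocks 0 tasks).2
  rw [← pv_sassoc "Сделанные:" "\n",
    ← pv_sassoc _ "\n" ((pvBlocks 0 tasks).2),
    pv_sassoc _ "\nОставшиеся:" "\n"]
  rfl
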